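-- pv_equiv track=rewrite | github.com/Jaehyeok-Seen/hom2class_sjh | A_swea problem/0903_start2/binary_to_decimal_print/bi_decimal_print.py | binary_decimal
-- ===== SOURCE A (Python) =====
-- def binary_decimal(binary_str,N):
--     print_result = []
--
--     for i in range(N):
--         binary_result = binary_str[i*7 : (i+1)*7]
--
--         decimal_number = 0
--         pow = 0
--         for digit in reversed(binary_result):
--             if digit == "1":
--                 decimal_number += 2 ** pow
--             pow += 1
--
--         print_result.append(decimal_number)
--
--     return print_result
-- ===== SOURCE B (Python) =====
-- def binary_decimal(binary_str, N):
--     if N <= 0: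
--         return []
--     out = []
--     cur = 0
--     cnt = 0
--     for c in binary_str[:7 * N]:
--         cur = cur * 2 + (1 if c == "1" else 0)
--         cnt += 1
--         if cnt == 7:
--             out.append(cur)
--             cur = 0
--             cnt = 0
--     if cnt != 0:
--         out.append(cur)
--     out.extend([0] * (N - len(out)))
--     return out
-- ===== Notes on version B (the rewrite author's own statement) =====
-- stated objective: alternative
-- what changed: Instead of slicing out each 7-bit chunk and summing reversed powers of two, B makes a single left-to-right pass over the first 7*N characters with a running Horner accumulator and a bit counter, emitting a value every 7 characters and padding the result with zeros for chunks beyond the string's end.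
import Mathlib
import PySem

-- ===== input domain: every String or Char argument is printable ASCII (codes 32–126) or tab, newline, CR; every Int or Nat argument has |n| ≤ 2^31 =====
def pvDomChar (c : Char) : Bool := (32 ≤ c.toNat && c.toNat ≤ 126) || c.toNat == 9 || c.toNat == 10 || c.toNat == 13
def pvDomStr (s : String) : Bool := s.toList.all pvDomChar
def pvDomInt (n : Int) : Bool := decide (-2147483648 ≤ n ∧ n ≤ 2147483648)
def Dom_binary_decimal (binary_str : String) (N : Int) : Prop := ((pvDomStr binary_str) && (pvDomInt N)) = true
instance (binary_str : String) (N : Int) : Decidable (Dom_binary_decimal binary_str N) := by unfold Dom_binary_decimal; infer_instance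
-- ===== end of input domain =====

-- B replaces A's per-chunk slice + reversed power-sum by a single left-to-right pass over the first 7*N characters
-- with a Horner accumulator and a bit counter, padding with zeros at the end (objective: alternative; return value only).


-- ===== PORT A =====
-- inner loop of A: reversed scan of the chunk with an explicit power counter
def aChunk (l : List Char) : Int :=
  (l.reverse.foldl (fun (s : Int × Nat) digit =>
    (if digit = '1' then s.1 + 2 ^ s.2 else s.1, s.2 + 1)) (0, 0)).1

def binary_decimal (binary_str : String) (N : Int) : List Int :=
  (PySem.List.pyRange 0 N 1).foldl
    (fun acc i =>
      acc ++ [aChunk (PySem.List.slice binary_str.toList (some (i*7)) (some ((i+1)*7)))]) []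

-- ===== PORT B =====
-- one step of B's single pass: Horner-update the accumulator, count to 7, emit and reset at 7
def bStep (s : List Int × Int × Nat) (c : Char) : List Int × Int × Nat :=
  let cur := s.2.1 * 2 + (if c = '1' then (1:Int) else 0)
  let cnt := s.2.2 + 1
  if cnt = 7 then (s.1 ++ [cur], 0, 0) else (s.1, cur, cnt)

def binary_decimal_alt (binary_str : String) (N : Int) : List Int :=
  if N ≤ 0 then []
  else
    let st := (PySem.List.slice binary_str.toList none (some (7 * N))).foldl bStep ([], 0, 0)
    let out := if st.2.2 ≠ 0 then st.1 ++ [st.2.1] else st.1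
    out ++ List.replicate (N - (out.length : Int)).toNat 0

-- ===== PRECONDITION & SPEC =====
def Spec_binary_decimal (binary_str : String) (N : Int) (out : List Int) : Prop := out = binary_decimal_alt binary_str N
instance (binary_str : String) (N : Int) (out : List Int) : Decidable (Spec_binary_decimal binary_str N out) := by unfold Spec_binary_decimal; infer_instance

-- ===== CLAIM (what is proved, stated in full; the proofs are below) =====
def Claim_equal_binary_decimal : Prop := ∀ (binary_str : String) (N : Int), Dom_binary_decimal binary_str N → Spec_binary_decimal binary_str N (binary_decimal binary_str N)

-- ===== LEMMAS AND PROOFS =====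

-- Horner value of a bit string (specification-side; both ports are reduced to it)
def hv (l : List Char) : Int :=
  l.foldl (fun d c => d * 2 + if c = '1' then 1 else 0) 0

-- little-endian value of a bit string, used to bridge A's reversed scan to hv
def leVal : List Char → Int
  | [] => 0
  | c :: r => (if c = '1' then (1:Int) else 0) + 2 * leVal r

theorem aChunk_fold (r : List Char) : ∀ (d : Int) (p : Nat),
    (r.foldl (fun (s : Int × Nat) digit =>
      (if digit = '1' then s.1 + 2 ^ s.2 else s.1, s.2 + 1)) (d, p)).1
      = d + 2 ^ p * leVal r := by
  induction r with
  | nil => intro d p; simp [leVal]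
  | cons c r ih =>
    intro d p
    simp only [List.foldl_cons, leVal, ih]
    split <;> ring_nf

theorem leVal_append (r : List Char) (c : Char) :
    leVal (r ++ [c]) = leVal r + 2 ^ r.length * (if c = '1' then 1 else 0) := by
  induction r with
  | nil => simp [leVal]
  | cons a r ih =>
    simp only [List.cons_append, leVal, ih, List.length_cons, pow_succ]
    split <;> ring

theorem hv_fold (l : List Char) : ∀ (d : Int),
    l.foldl (fun d c => d * 2 + if c = '1' then 1 else 0) d
      = d * 2 ^ l.length + leVal l.reverse := by
  induction l with
  | nil => intro d; simp [leVal]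
  | cons c l ih =>
    intro d
    simp only [List.foldl_cons, ih, List.reverse_cons, leVal_append,
      List.length_reverse, List.length_cons, pow_succ]
    ring

theorem chunk_eq (l : List Char) : aChunk l = hv l := by
  have h1 : aChunk l = leVal l.reverse := by
    unfold aChunk; rw [aChunk_fold]; simp
  have h2 : hv l = leVal l.reverse := by
    unfold hv; simpa using hv_fold l 0
  rw [h1, h2]

-- the state B's pass ends in: full 7-chunk values, residual accumulator, residual count
def split7 (l : List Char) : List Int × Int × Nat :=
  if _h : 7 ≤ l.length then
    let r := split7 (l.drop 7)
    (hv (l.take 7) :: r.1, r.2)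
  else ([], hv l, l.length)
termination_by l.length
decreasing_by simp; omega

-- B's step fold on fewer than 7 remaining counts just folds the accumulator
theorem bStep_partial (l : List Char) : ∀ (out : List Int) (cur : Int) (cnt : Nat),
    cnt + l.length < 7 →
    l.foldl bStep (out, cur, cnt)
      = (out, l.foldl (fun d c => d * 2 + if c = '1' then 1 else 0) cur, cnt + l.length) := by
  induction l with
  | nil => intro out cur cnt _; simp
  | cons c l ih =>
    intro out cur cnt h
    simp only [List.length_cons] at h
    have hne : cnt + 1 ≠ 7 := by omega
    simp only [List.foldl_cons, bStep, if_neg hne]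
    rw [ih _ _ _ (by omega)]
    simp; omega

-- B's step fold on exactly 7 remaining counts emits one chunk value and resets
theorem bStep_exact (l : List Char) : ∀ (out : List Int) (cur : Int) (cnt : Nat),
    cnt + l.length = 7 → cnt < 7 →
    l.foldl bStep (out, cur, cnt)
      = (out ++ [l.foldl (fun d c => d * 2 + if c = '1' then 1 else 0) cur], 0, 0) := by
  induction l with
  | nil => intro out cur cnt h h7; simp at h; omega
  | cons c l ih =>
    intro out cur cnt h h7
    simp only [List.length_cons] at h
    by_cases h0 : l.length = 0
    · have hl : l = [] := List.eq_nil_of_length_eq_zero h0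
      subst hl
      have : cnt + 1 = 7 := by omega
      simp [bStep, this]
    · have hne : cnt + 1 ≠ 7 := by omega
      simp only [List.foldl_cons, bStep, if_neg hne]
      exact ih _ _ _ (by omega) (by omega)

-- B's whole pass computes split7
theorem bStep_split7 : ∀ (n : Nat) (l : List Char), l.length ≤ n → ∀ (out : List Int),
    l.foldl bStep (out, 0, 0) = (out ++ (split7 l).1, (split7 l).2) := by
  intro n
  induction n with
  | zero =>
    intro l hl out
    have : l = [] := List.eq_nil_of_length_eq_zero (by omega)
    subst this
    rw [split7]; simp [hv]
  | succ n ih =>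
    intro l hl out
    by_cases h7 : 7 ≤ l.length
    · rw [split7, dif_pos h7]
      conv_lhs => rw [← List.take_append_drop 7 l, List.foldl_append]
      rw [bStep_exact (l.take 7) out 0 0
        (by simp [List.length_take]; omega) (by omega)]
      rw [ih (l.drop 7) (by simp [List.length_drop]; omega)]
      simp [hv]
    · rw [split7, dif_neg h7]
      rw [bStep_partial l out 0 0 (by omega)]
      simp [hv]

-- post-processing of the pass result (pad with zeros), as B does after the loop
def padOut (l : List Char) (n : Nat) : List Int :=
  let s := split7 l
  let out := if s.2.2 ≠ 0 then s.1 ++ [s.2.1] else s.1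
  out ++ List.replicate ((n : Int) - (out.length : Int)).toNat 0

-- range map of a constant-zero function is a zero list
theorem map_zero_replicate (n : Nat) (f : Nat → Int) (h : ∀ k, k < n → f k = 0) :
    (List.range n).map f = List.replicate n 0 := by
  rw [List.eq_replicate_iff]
  refine ⟨by simp, ?_⟩
  intro x hx
  rcases List.mem_map.mp hx with ⟨k, hk, rfl⟩
  exact h k (List.mem_range.mp hk)

theorem padOut_step (l : List Char) (n : Nat) (h7 : 7 ≤ l.length) :
    padOut l (n + 1) = hv (l.take 7) :: padOut (l.drop 7) n := by
  have harith : ∀ x : Nat, (((n + 1 : Nat)) : Int) - (((x + 1 : Nat)) : Int)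
      = ((n : Nat) : Int) - ((x : Nat) : Int) := by intro x; push_cast; ring
  unfold padOut
  rw [split7, dif_pos h7]
  by_cases hz : (split7 (l.drop 7)).2.2 = 0 <;>
    simp only [hz, ne_eq, not_true_eq_false, not_false_eq_true, if_false, if_true,
      List.cons_append, List.length_cons] <;>
    rw [harith]

theorem padOut_small (l : List Char) (n : Nat) (h7 : l.length < 7) (h0 : l ≠ []) :
    padOut l (n + 1) = hv l :: List.replicate n 0 := by
  unfold padOut
  rw [split7, dif_neg (by omega)]
  have : l.length ≠ 0 := by
    intro h; exact h0 (List.eq_nil_of_length_eq_zero h)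
  simp [this]

theorem padOut_nil (n : Nat) : padOut [] n = List.replicate n 0 := by
  unfold padOut
  rw [split7]
  simp

-- the padded pass result equals the per-chunk map
theorem split7_map : ∀ (n : Nat) (l : List Char), l.length ≤ 7 * n →
    padOut l n = (List.range n).map (fun k => hv ((l.drop (7 * k)).take 7)) := by
  intro n
  induction n with
  | zero =>
    intro l hl
    have : l = [] := List.eq_nil_of_length_eq_zero (by omega)
    subst this
    simp [padOut_nil]
  | succ n ih =>
    intro l hl
    rw [List.range_succ_eq_map, List.map_cons, List.map_map]
    by_cases h7 : 7 ≤ l.length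
    · have htail : (List.range n).map
            (fun k => hv (((l.drop 7).drop (7 * k)).take 7))
          = (List.range n).map
            ((fun k => hv ((l.drop (7 * k)).take 7)) ∘ Nat.succ) := by
        apply List.map_congr_left
        intro k _
        simp only [Function.comp_apply, List.drop_drop]
        congr 3
        omega
      rw [padOut_step l n h7, ih (l.drop 7) (by simp; omega), htail]
      simp
    · by_cases h0 : l = []
      · subst h0
        rw [padOut_nil]
        simp only [List.drop_nil, List.take_nil, List.replicate_succ, hv,
          List.foldl_nil]
        exact congrArg _ ((map_zero_replicate n _ (fun k _ => rfl)).symm)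
      · rw [padOut_small l n (by omega) h0]
        congr 1
        · simp [List.take_of_length_le (by omega : l.length ≤ 7)]
        · rw [map_zero_replicate]
          intro k _
          simp [List.drop_eq_nil_of_le
            (by omega : l.length ≤ 7 * (k + 1)), hv]

-- A's side as a chunk map over hv
theorem a_side (l : List Char) (n : Nat) :
    (PySem.List.pyRange 0 (n : Int) 1).foldl
      (fun acc i => acc ++ [aChunk (PySem.List.slice l (some (i*7)) (some ((i+1)*7)))]) []
      = (List.range n).map (fun k => hv ((l.drop (7 * k)).take 7)) := by
  rw [PySem.List.foldl_append_singleton_eq_map, PySem.List.pyRange_one, List.map_map]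
  simp only [List.nil_append, Int.sub_zero, Int.toNat_natCast]
  apply List.map_congr_left
  intro k _
  simp only [Function.comp_apply, chunk_eq, zero_add]
  have h1 : ((k : Int)) * 7 = ((7 * k : Nat) : Int) := by push_cast; ring
  have h2 : ((k : Int) + 1) * 7 = ((7 * k + 7 : Nat) : Int) := by push_cast; ring
  rw [h1, h2, PySem.List.slice_natCast, Nat.add_sub_cancel_left]

-- ===== VERDICT (by name: the statement is the Claim_ definition above) =====
theorem binary_decimal_spec : Claim_equal_binary_decimal := by
  intro s N _
  unfold Spec_binary_decimal binary_decimal binary_decimal_alt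
  by_cases hN : N ≤ 0
  · rw [if_pos hN, PySem.List.pyRange_one_eq_nil hN]
    simp
  · rw [if_neg hN]
    have hn : N = ((N.toNat : Nat) : Int) := (Int.toNat_of_nonneg (by omega)).symm
    rw [hn]
    have hsl : (7 : Int) * ((N.toNat : Nat) : Int) = ((7 * N.toNat : Nat) : Int) := by
      push_cast; ring
    rw [hsl, PySem.List.slice_to_natCast]
    rw [bStep_split7 (s.toList.take (7 * N.toNat)).length _ le_rfl []]
    simp only [List.nil_append]
    rw [a_side]
    calc (List.range N.toNat).map (fun k => hv ((s.toList.drop (7 * k)).take 7))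
        = (List.range N.toNat).map
            (fun k => hv (((s.toList.take (7 * N.toNat)).drop (7 * k)).take 7)) := by
          apply List.map_congr_left
          intro k hk
          have hk' : k < N.toNat := List.mem_range.mp hk
          rw [List.drop_take, List.take_take, min_eq_left (by omega)]
      _ = padOut (s.toList.take (7 * N.toNat)) N.toNat := by
          rw [split7_map N.toNat _ (by simp)]
      _ = _ := rfl
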